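-- pv_equiv track=rewrite | github.com/BulankovEugeniy/split_combinator | get_naturals/modules/make_mixes.py | check_mixes_for_mandatory
-- ===== SOURCE A (Python) =====
-- def check_mixes_for_mandatory(mixes, mp_array):
-- 	for channel_offset in range(len(mp_array)):
-- 		if mp_array[channel_offset] == "Yes":
-- 			for mix_offset in range(len(mixes)):
-- 				mixes[mix_offset][channel_offset] = 1
-- 		if mp_array[channel_offset] == "No":
-- 			for mix_offset in range(len(mixes)):
-- 				mixes[mix_offset][channel_offset] = 0
-- 	return mixes
-- ===== SOURCE B (Python) =====
-- def check_mixes_for_mandatory(mixes, mp_array):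
--     def force(flag, old):
--         if flag == "Yes":
--             return 1
--         if flag == "No":
--             return 0
--         return old
--     return [[force(f, v) for v, f in zip(mix, mp_array)] + mix[len(mp_array):]
--             for mix in mixes]
-- ===== Notes on version B (the rewrite author's own statement) =====
-- stated objective: alternative
-- what changed: B is a pure functional reconstruction: instead of A's in-place column assignments over nested index loops, each row is rebuilt once by zipping it with mp_array and selecting 1/0/old per flag (no mutation, no index arithmetic).
import Mathlib
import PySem

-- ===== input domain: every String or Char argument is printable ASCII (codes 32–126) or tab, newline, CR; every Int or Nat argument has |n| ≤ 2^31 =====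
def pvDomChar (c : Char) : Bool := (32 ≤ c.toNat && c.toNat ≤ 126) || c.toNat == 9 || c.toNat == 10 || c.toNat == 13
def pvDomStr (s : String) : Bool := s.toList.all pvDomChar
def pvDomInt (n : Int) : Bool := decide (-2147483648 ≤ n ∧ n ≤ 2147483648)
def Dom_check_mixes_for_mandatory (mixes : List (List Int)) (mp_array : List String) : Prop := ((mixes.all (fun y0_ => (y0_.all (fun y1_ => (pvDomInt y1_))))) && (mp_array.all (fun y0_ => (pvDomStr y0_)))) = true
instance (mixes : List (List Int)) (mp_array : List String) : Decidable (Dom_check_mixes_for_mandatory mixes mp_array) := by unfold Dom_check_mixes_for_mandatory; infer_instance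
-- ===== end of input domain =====

-- B rebuilds each row purely (zip with mp_array, choose 1/0/old per flag) instead of A's
-- in-place column assignments (alternative decomposition, same return value). Python A
-- mutates `mixes` in place, Python B does not: the equivalence is about the RETURN value.

-- ===== PORT A =====
-- Literal port of A: outer loop over range(len(mp_array)); each 'if' rewrites the whole
-- column of every mix. mp_array[channel_offset] is always in range, so getD is exact;
-- the item assignment mixes[mix_offset][channel_offset] = v raises IndexError when the
-- row is too short — those inputs are excluded by Pre_ (List.set is a no-op there).
def check_mixes_for_mandatory (mixes : List (List Int)) (mp_array : List String) : List (List Int) :=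
  (List.range mp_array.length).foldl
    (fun ms channel_offset =>
      let ms1 := if mp_array.getD channel_offset "" = "Yes"
                 then ms.map (fun mix => mix.set channel_offset 1) else ms
      let ms2 := if mp_array.getD channel_offset "" = "No"
                 then ms1.map (fun mix => mix.set channel_offset 0) else ms1
      ms2)
    mixes

-- ===== PORT B =====
-- Port of Source B's force(flag, old).
def pvForce (flag : String) (old : Int) : Int :=
  if flag = "Yes" then 1 else if flag = "No" then 0 else old

-- Port of Source B's comprehension: zip each row with mp_array, keep the tail past mp_array.
def check_mixes_for_mandatory_alt (mixes : List (List Int)) (mp_array : List String) : List (List Int) :=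
  mixes.map (fun mix =>
    (mix.zip mp_array).map (fun p => pvForce p.2 p.1) ++ mix.drop mp_array.length)

-- ===== PRECONDITION & SPEC =====
-- Pre_ excludes exactly the inputs where Python A raises IndexError: a mandatory
-- ("Yes"/"No") channel offset not shorter than some mix row.
def Pre_check_mixes_for_mandatory (mixes : List (List Int)) (mp_array : List String) : Prop :=
  ∀ c ∈ List.range mp_array.length,
    (mp_array.getD c "" = "Yes" ∨ mp_array.getD c "" = "No") →
      ∀ mix ∈ mixes, c < mix.length
instance (mixes : List (List Int)) (mp_array : List String) : Decidable (Pre_check_mixes_for_mandatory mixes mp_array) := by unfold Pre_check_mixes_for_mandatory; infer_instance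

def pvWitness_check_mixes_for_mandatory : List (List Int) × List String :=
  ([[5, 6, 7], [8, 9, 10]], ["Yes", "maybe", "No"])

def Spec_check_mixes_for_mandatory (mixes : List (List Int)) (mp_array : List String) (out : List (List Int)) : Prop := out = check_mixes_for_mandatory_alt mixes mp_array
instance (mixes : List (List Int)) (mp_array : List String) (out : List (List Int)) : Decidable (Spec_check_mixes_for_mandatory mixes mp_array out) := by unfold Spec_check_mixes_for_mandatory; infer_instance

-- ===== CLAIM (what is proved, stated in full; the proofs are below) =====
def Claim_equal_check_mixes_for_mandatory : Prop := ∀ (mixes : List (List Int)) (mp_array : List String), Dom_check_mixes_for_mandatory mixes mp_array → Pre_check_mixes_for_mandatory mixes mp_array → Spec_check_mixes_for_mandatory mixes mp_array (check_mixes_for_mandatory mixes mp_array)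

-- ===== LEMMAS AND PROOFS =====

-- per-row effect of one channel of A
def pvStepRow (flag : String) (c : Nat) (row : List Int) : List Int :=
  let r1 := if flag = "Yes" then row.set c 1 else row
  if flag = "No" then r1.set c 0 else r1

-- A's per-channel step on the whole list of mixes is a map of the per-row step.
theorem pvStep_eq_map (mp : List String) (c : Nat) (ms : List (List Int)) :
    (let ms1 := if mp.getD c "" = "Yes" then ms.map (fun mix => mix.set c 1) else ms
     let ms2 := if mp.getD c "" = "No" then ms1.map (fun mix => mix.set c 0) else ms1
     ms2)
    = ms.map (pvStepRow (mp.getD c "") c) := by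
  generalize mp.getD c "" = s
  by_cases hy : s = "Yes" <;> by_cases hn : s = "No"
  · simp [hy] at hn
  · subst hy; simp [pvStepRow]
  · subst hn; simp [pvStepRow]
  · have hid : pvStepRow s c = fun row => row := by
      funext row; simp [pvStepRow, hy, hn]
    simp [hy, hn, hid]

-- folding maps over a list of channels = mapping the per-row fold
theorem pvFoldl_map_comm {α β : Type} (h : β → α → α) (l : List β) (ms : List α) :
    l.foldl (fun ms c => ms.map (h c)) ms = ms.map (fun row => l.foldl (fun r c => h c r) row) := by
  induction l generalizing ms with
  | nil => simp
  | cons c rest ih => simp only [List.foldl_cons, ih, List.map_map]; rfl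

-- one step of A at the split point replaces the head of the suffix by pvForce
theorem pvStepRow_append (f : String) (pre : List Int) (v : Int) (tail : List Int) :
    pvStepRow f pre.length (pre ++ v :: tail) = pre ++ pvForce f v :: tail := by
  unfold pvStepRow pvForce
  by_cases hy : f = "Yes" <;> by_cases hn : f = "No" <;>
    simp_all

-- a sweep whose offsets all lie past the end of the row is a no-op
theorem pvFold_ge (mp : List String) (k : Nat) (row : List Int) (h : row.length ≤ k) :
    (List.range mp.length).foldl (fun r i => pvStepRow (mp.getD i "") (i + k) r) row = row := by
  induction mp generalizing k with
  | nil => simp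
  | cons f rest ih =>
      rw [show (f :: rest).length = rest.length + 1 from rfl, List.range_succ_eq_map]
      simp only [List.foldl_cons, List.foldl_map]
      have h0 : pvStepRow ((f :: rest).getD 0 "") (0 + k) row = row := by
        unfold pvStepRow
        have hs1 : row.set k (1 : Int) = row := List.set_eq_of_length_le h
        have hs0 : row.set k (0 : Int) = row := List.set_eq_of_length_le h
        by_cases hy : (f :: rest).getD 0 "" = "Yes" <;>
          by_cases hn : (f :: rest).getD 0 "" = "No" <;> simp_all
      rw [h0]
      have hext : (List.range rest.length).foldl
          (fun r i => pvStepRow ((f :: rest).getD (i + 1) "") ((i + 1) + k) r) row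
          = (List.range rest.length).foldl (fun r i => pvStepRow (rest.getD i "") (i + (k + 1)) r) row := by
        apply PySem.List.foldl_congr_mem
        intro r i _
        have he : (i + 1) + k = i + (k + 1) := by omega
        simp [he]
      rw [hext]
      exact ih (k + 1) (by omega)

-- the channel sweep at offset |pre| on pre ++ suf rebuilds the suffix as B does
theorem pvRowSplit (mp : List String) (pre suf : List Int) :
    (List.range mp.length).foldl (fun r i => pvStepRow (mp.getD i "") (i + pre.length) r) (pre ++ suf)
    = pre ++ (suf.zip mp).map (fun p => pvForce p.2 p.1) ++ suf.drop mp.length := by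
  induction mp generalizing pre suf with
  | nil => simp
  | cons f rest ih =>
      cases suf with
      | nil =>
          rw [pvFold_ge _ _ _ (by simp)]
          simp
      | cons v tail =>
          rw [show (f :: rest).length = rest.length + 1 from rfl, List.range_succ_eq_map]
          simp only [List.foldl_cons, List.foldl_map, Nat.zero_add]
          rw [show pvStepRow ((f :: rest).getD 0 "") pre.length (pre ++ v :: tail)
                = pre ++ pvForce f v :: tail by
              simpa using pvStepRow_append f pre v tail]
          have hmid : pre ++ pvForce f v :: tail = (pre ++ [pvForce f v]) ++ tail := by simp
          rw [hmid]
          have hx : (List.range rest.length).foldl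
              (fun r i => pvStepRow ((f :: rest).getD (i + 1) "") ((i + 1) + pre.length) r)
              ((pre ++ [pvForce f v]) ++ tail)
              = (List.range rest.length).foldl
                (fun r i => pvStepRow (rest.getD i "") (i + (pre ++ [pvForce f v]).length) r)
                ((pre ++ [pvForce f v]) ++ tail) := by
            apply PySem.List.foldl_congr_mem
            intro r i _
            have he : (i + 1) + pre.length = i + (pre ++ [pvForce f v]).length := by
              simp; omega
            simp [he]
          rw [hx, ih (pre ++ [pvForce f v]) tail]
          simp

theorem pvMain (mixes : List (List Int)) (mp : List String) :
    check_mixes_for_mandatory mixes mp = check_mixes_for_mandatory_alt mixes mp := by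
  unfold check_mixes_for_mandatory check_mixes_for_mandatory_alt
  have hstep : (fun (ms : List (List Int)) (c : Nat) =>
      let ms1 := if mp.getD c "" = "Yes" then ms.map (fun mix => mix.set c 1) else ms
      let ms2 := if mp.getD c "" = "No" then ms1.map (fun mix => mix.set c 0) else ms1
      ms2)
      = fun ms c => ms.map (pvStepRow (mp.getD c "") c) := by
    funext ms c; exact pvStep_eq_map mp c ms
  rw [hstep, pvFoldl_map_comm]
  apply List.map_congr_left
  intro row _
  have h := pvRowSplit mp ([] : List Int) row
  simp only [List.nil_append, List.length_nil] at h
  rw [← h]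
  apply PySem.List.foldl_congr_mem
  intro r i _
  simp

-- ===== VERDICT (by name: the statement is the Claim_ definition above) =====
theorem check_mixes_for_mandatory_spec : Claim_equal_check_mixes_for_mandatory := by
  intro mixes mp _ _
  unfold Spec_check_mixes_for_mandatory
  exact pvMain mixes mp
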